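-- pv_equiv track=rewrite | github.com/zhusq20/reasoning-evals | arc_agi/playpen/test_answers/first.py | transform_gpt_4o
-- ===== SOURCE A (Python) =====
-- def transform_gpt_4o(grid: list[list[int]]) -> list[list[int]]:
--     def expand_3x3_to_9x9(subgrid):
--         expanded = [[0] * 9 for _ in range(9)]
--
--         # Set values according to observed patterns
--         for i in range(3):
--             for j in range(3):
--                 value = subgrid[i][j]
--                 if value != 0:
--                     # Expand this value into 5 specific cells in the 9x9 grid
--                     positions = [
--                         (i * 3, j * 3),
--                         (i * 3 + 1, j * 3 + 1),
--                         (i * 3 + 2, j * 3 + 2),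
--                         (i * 3 + 2, j * 3),
--                         (i * 3, j * 3 + 2),
--                     ]
--                     for x, y in positions:
--                         expanded[x][y] = value
--         return expanded
--
--     # Expand input grid
--     output_grid = expand_3x3_to_9x9(grid)
--     return output_grid
-- ===== SOURCE B (Python) =====
-- def transform_gpt_4o(grid: list[list[int]]) -> list[list[int]]:
--     # Output-driven: for each of the 81 output cells, pull from the source
--     # cell (x//3, y//3) if the in-block offset (x%3, y%3) lies on the X-mask.
--     mask = {(0, 0), (1, 1), (2, 2), (2, 0), (0, 2)}
--     return [
--         [grid[x // 3][y // 3] if (x % 3, y % 3) in mask else 0 for y in range(9)]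
--         for x in range(9)
--     ]
-- ===== Notes on version B (the rewrite author's own statement) =====
-- stated objective: alternative
-- what changed: Inverted the traversal: instead of pushing five writes per nonzero source cell into a mutable zero grid, B builds each of the 81 output cells directly, pulling grid[x//3][y//3] when the in-block offset (x%3,y%3) is on the X-mask and 0 otherwise.
import Mathlib
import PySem

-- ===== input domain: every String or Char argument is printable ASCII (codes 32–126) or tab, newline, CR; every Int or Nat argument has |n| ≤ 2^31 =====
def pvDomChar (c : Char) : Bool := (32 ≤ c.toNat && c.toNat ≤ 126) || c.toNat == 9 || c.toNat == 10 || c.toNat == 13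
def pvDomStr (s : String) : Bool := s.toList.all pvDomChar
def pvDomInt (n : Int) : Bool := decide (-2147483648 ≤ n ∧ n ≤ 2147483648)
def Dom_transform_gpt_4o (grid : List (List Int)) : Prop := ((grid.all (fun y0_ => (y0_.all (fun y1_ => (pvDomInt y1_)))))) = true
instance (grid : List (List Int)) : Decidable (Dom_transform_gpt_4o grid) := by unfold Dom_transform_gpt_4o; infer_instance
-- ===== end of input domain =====

-- B changes the decomposition: it pulls each of the 81 output cells from the source grid
-- via (x//3, y//3) and an offset mask, instead of A's five writes per nonzero source cell.

-- ===== PORT A =====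
-- 'expanded[x][y] = value' is ported as replacing row x by the row with index y set
-- (PySem.List.pySetD; indices are always in range here, matching Python's in-range assignment).
def transform_gpt_4o (grid : List (List Int)) : List (List Int) :=
  let expanded0 : List (List Int) :=
    (PySem.List.pyRange 0 9 1).map (fun _ => List.replicate 9 (0 : Int))
  (PySem.List.pyRange 0 3 1).foldl (fun expanded i =>
    (PySem.List.pyRange 0 3 1).foldl (fun expanded j =>
      let value := PySem.List.pyGetD (PySem.List.pyGetD grid i []) j 0
      if value ≠ 0 then
        ([(i * 3, j * 3), (i * 3 + 1, j * 3 + 1), (i * 3 + 2, j * 3 + 2),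
          (i * 3 + 2, j * 3), (i * 3, j * 3 + 2)] : List (Int × Int)).foldl
          (fun expanded xy =>
            PySem.List.pySetD expanded xy.1
              (PySem.List.pySetD (PySem.List.pyGetD expanded xy.1 []) xy.2 value)) expanded
      else expanded) expanded) expanded0

-- ===== PORT B =====
def transform_gpt_4o_alt (grid : List (List Int)) : List (List Int) :=
  let mask : PySem.Set (Int × Int) := PySem.Set.ofList [(0, 0), (1, 1), (2, 2), (2, 0), (0, 2)]
  (PySem.List.pyRange 0 9 1).map (fun x =>
    (PySem.List.pyRange 0 9 1).map (fun y =>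
      if PySem.Set.contains mask (PySem.Int.mod x 3, PySem.Int.mod y 3) then
        PySem.List.pyGetD (PySem.List.pyGetD grid (PySem.Int.floordiv x 3) [])
          (PySem.Int.floordiv y 3) 0
      else 0))

-- ===== PRECONDITION & SPEC =====
-- A indexes grid[i][j] for i, j in 0..2: it raises IndexError unless the grid has at
-- least 3 rows whose first 3 rows each have at least 3 entries.
def Pre_transform_gpt_4o (grid : List (List Int)) : Prop :=
  3 ≤ grid.length ∧ ∀ r ∈ grid.take 3, 3 ≤ r.length
instance (grid : List (List Int)) : Decidable (Pre_transform_gpt_4o grid) := by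
  unfold Pre_transform_gpt_4o; infer_instance
def pvWitness_transform_gpt_4o : List (List Int) := [[1, 0, 2], [0, 3, 0], [4, 5, 6]]

def Spec_transform_gpt_4o (grid : List (List Int)) (out : List (List Int)) : Prop := out = transform_gpt_4o_alt grid
instance (grid : List (List Int)) (out : List (List Int)) : Decidable (Spec_transform_gpt_4o grid out) := by unfold Spec_transform_gpt_4o; infer_instance

-- ===== CLAIM (what is proved, stated in full; the proofs are below) =====
def Claim_equal_transform_gpt_4o : Prop := ∀ (grid : List (List Int)), Dom_transform_gpt_4o grid → Pre_transform_gpt_4o grid → Spec_transform_gpt_4o grid (transform_gpt_4o grid)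

-- ===== LEMMAS AND PROOFS =====

-- helper used only by the proofs: the body of A's inner loop for one source cell
def pvS (value i j : Int) (expanded : List (List Int)) : List (List Int) :=
  if value ≠ 0 then
    ([(i * 3, j * 3), (i * 3 + 1, j * 3 + 1), (i * 3 + 2, j * 3 + 2),
      (i * 3 + 2, j * 3), (i * 3, j * 3 + 2)] : List (Int × Int)).foldl
      (fun expanded xy =>
        PySem.List.pySetD expanded xy.1
          (PySem.List.pySetD (PySem.List.pyGetD expanded xy.1 []) xy.2 value)) expanded
  else expanded

theorem pvS_eq (v i j : Int) (e : List (List Int)) :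
    (if v ≠ 0 then
      ([(i * 3, j * 3), (i * 3 + 1, j * 3 + 1), (i * 3 + 2, j * 3 + 2),
        (i * 3 + 2, j * 3), (i * 3, j * 3 + 2)] : List (Int × Int)).foldl
        (fun expanded xy =>
          PySem.List.pySetD expanded xy.1
            (PySem.List.pySetD (PySem.List.pyGetD expanded xy.1 []) xy.2 v)) e
    else e) = pvS v i j e := rfl

theorem pvStep0 (a0 a1 a2 b0 b1 b2 c0 c1 c2 : Int) :
    pvS a0 0 0 ([[0, 0, 0, 0, 0, 0, 0, 0, 0], [0, 0, 0, 0, 0, 0, 0, 0, 0], [0, 0, 0, 0, 0, 0, 0, 0, 0], [0, 0, 0, 0, 0, 0, 0, 0, 0], [0, 0, 0, 0, 0, 0, 0, 0, 0], [0, 0, 0, 0, 0, 0, 0, 0, 0], [0, 0, 0, 0, 0, 0, 0, 0, 0], [0, 0, 0, 0, 0, 0, 0, 0, 0], [0, 0, 0, 0, 0, 0, 0, 0, 0]] : List (List Int)) = ([[a0, 0, a0, 0, 0, 0, 0, 0, 0], [0, a0, 0, 0, 0, 0, 0, 0, 0], [a0, 0, a0, 0, 0, 0, 0, 0, 0], [0,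 0, 0, 0, 0, 0, 0, 0, 0], [0, 0, 0, 0, 0, 0, 0, 0, 0], [0, 0, 0, 0, 0, 0, 0, 0, 0], [0, 0, 0, 0, 0, 0, 0, 0, 0], [0, 0, 0, 0, 0, 0, 0, 0, 0], [0, 0, 0, 0, 0, 0, 0, 0, 0]] : List (List Int)) := by
  by_cases h : a0 = 0
  · subst h; simp [pvS]
  · simp [pvS, h, PySem.List.pySetD, PySem.List.pySet?, PySem.List.pyGetD, PySem.List.pyGet?, PySem.List.pyIdx?, List.set]

theorem pvStep1 (a0 a1 a2 b0 b1 b2 c0 c1 c2 : Int) :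
    pvS a1 0 1 ([[a0, 0, a0, 0, 0, 0, 0, 0, 0], [0, a0, 0, 0, 0, 0, 0, 0, 0], [a0, 0, a0, 0, 0, 0, 0, 0, 0], [0, 0, 0, 0, 0, 0, 0, 0, 0], [0, 0, 0, 0, 0, 0, 0, 0, 0], [0, 0, 0, 0, 0, 0, 0, 0, 0], [0, 0, 0, 0, 0, 0, 0, 0, 0], [0, 0, 0, 0, 0, 0, 0, 0, 0], [0, 0, 0, 0, 0, 0, 0, 0, 0]] : List (List Int)) = ([[a0, 0, a0, a1, 0, a1, 0, 0, 0], [0, a0, 0, 0, a1, 0, 0, 0, 0], [a0, 0, a0, a1, 0, a1, 0, 0, 0], [0, 0, 0, 0, 0, 0, 0, 0, 0], [0, 0, 0, 0, 0, 0, 0, 0, 0], [0, 0, 0, 0, 0, 0, 0, 0, 0], [0, 0, 0, 0, 0, 0, 0, 0, 0], [0, 0, 0, 0, 0, 0, 0, 0, 0], [0, 0, 0, 0, 0, 0, 0, 0, 0]] : List (List Int)) := by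
  by_cases h : a1 = 0
  · subst h; simp [pvS]
  · simp [pvS, h, PySem.List.pySetD, PySem.List.pySet?, PySem.List.pyGetD, PySem.List.pyGet?, PySem.List.pyIdx?, List.set]

theorem pvStep2 (a0 a1 a2 b0 b1 b2 c0 c1 c2 : Int) :
    pvS a2 0 2 ([[a0, 0, a0, a1, 0, a1, 0, 0, 0], [0, a0, 0, 0, a1, 0, 0, 0, 0], [a0, 0, a0, a1, 0, a1, 0, 0, 0], [0, 0, 0, 0, 0, 0, 0, 0, 0], [0, 0, 0, 0, 0, 0, 0, 0, 0], [0, 0, 0, 0, 0, 0, 0, 0, 0], [0, 0, 0, 0, 0, 0, 0, 0, 0], [0, 0, 0, 0, 0, 0, 0, 0, 0], [0, 0, 0, 0, 0, 0, 0, 0, 0]] : List (List Int)) = ([[a0, 0, a0, a1, 0, a1, a2, 0, a2], [0, a0, 0, 0, a1, 0, 0, a2, 0], [a0, 0, a0, a1, 0, a1, a2, 0, a2], [0, 0, 0, 0, 0, 0, 0, 0, 0], [0, 0, 0, 0, 0, 0, 0, 0, 0], [0, 0, 0, 0, 0, 0, 0, 0, 0], [0, 0, 0, 0, 0, 0, 0,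 0, 0], [0, 0, 0, 0, 0, 0, 0, 0, 0], [0, 0, 0, 0, 0, 0, 0, 0, 0]] : List (List Int)) := by
  by_cases h : a2 = 0
  · subst h; simp [pvS]
  · simp [pvS, h, PySem.List.pySetD, PySem.List.pySet?, PySem.List.pyGetD, PySem.List.pyGet?, PySem.List.pyIdx?, List.set]

theorem pvStep3 (a0 a1 a2 b0 b1 b2 c0 c1 c2 : Int) :
    pvS b0 1 0 ([[a0, 0, a0, a1, 0, a1, a2, 0, a2], [0, a0, 0, 0, a1, 0, 0, a2, 0], [a0, 0, a0, a1, 0, a1, a2, 0, a2], [0, 0, 0, 0, 0, 0, 0, 0, 0], [0, 0, 0, 0, 0, 0, 0, 0, 0], [0, 0, 0, 0, 0, 0, 0, 0, 0], [0, 0, 0, 0, 0, 0, 0, 0, 0], [0, 0, 0, 0, 0, 0, 0, 0, 0], [0, 0, 0, 0, 0, 0, 0, 0, 0]] : List (List Int)) = ([[a0, 0, a0, a1, 0, a1, a2, 0, a2], [0, a0, 0, 0, a1, 0, 0, a2, 0], [a0, 0, a0, a1, 0, a1, a2, 0, a2], [b0, 0, b0, 0, 0, 0, 0, 0, 0], [0,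 b0, 0, 0, 0, 0, 0, 0, 0], [b0, 0, b0, 0, 0, 0, 0, 0, 0], [0, 0, 0, 0, 0, 0, 0, 0, 0], [0, 0, 0, 0, 0, 0, 0, 0, 0], [0, 0, 0, 0, 0, 0, 0, 0, 0]] : List (List Int)) := by
  by_cases h : b0 = 0
  · subst h; simp [pvS]
  · simp [pvS, h, PySem.List.pySetD, PySem.List.pySet?, PySem.List.pyGetD, PySem.List.pyGet?, PySem.List.pyIdx?, List.set]

theorem pvStep4 (a0 a1 a2 b0 b1 b2 c0 c1 c2 : Int) :
    pvS b1 1 1 ([[a0, 0, a0, a1, 0, a1, a2, 0, a2], [0, a0, 0, 0, a1, 0, 0, a2, 0], [a0, 0, a0, a1, 0, a1, a2, 0, a2], [b0, 0, b0, 0, 0, 0, 0, 0, 0], [0, b0, 0, 0, 0, 0, 0, 0, 0], [b0, 0, b0, 0, 0, 0, 0, 0, 0], [0, 0, 0, 0, 0, 0, 0, 0, 0], [0, 0, 0, 0, 0, 0, 0, 0, 0], [0, 0, 0, 0, 0, 0, 0, 0, 0]] : List (List Int)) = ([[a0, 0, a0, a1, 0, a1, a2, 0, a2], [0, a0, 0,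 0, a1, 0, 0, a2, 0], [a0, 0, a0, a1, 0, a1, a2, 0, a2], [b0, 0, b0, b1, 0, b1, 0, 0, 0], [0, b0, 0, 0, b1, 0, 0, 0, 0], [b0, 0, b0, b1, 0, b1, 0, 0, 0], [0, 0, 0, 0, 0, 0, 0, 0, 0], [0, 0, 0, 0, 0, 0, 0, 0, 0], [0, 0, 0, 0, 0, 0, 0, 0, 0]] : List (List Int)) := by
  by_cases h : b1 = 0
  · subst h; simp [pvS]
  · simp [pvS, h, PySem.List.pySetD, PySem.List.pySet?, PySem.List.pyGetD, PySem.List.pyGet?, PySem.List.pyIdx?, List.set]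

theorem pvStep5 (a0 a1 a2 b0 b1 b2 c0 c1 c2 : Int) :
    pvS b2 1 2 ([[a0, 0, a0, a1, 0, a1, a2, 0, a2], [0, a0, 0, 0, a1, 0, 0, a2, 0], [a0, 0, a0, a1, 0, a1, a2, 0, a2], [b0, 0, b0, b1, 0, b1, 0, 0, 0], [0, b0, 0, 0, b1, 0, 0, 0, 0], [b0, 0, b0, b1, 0, b1, 0, 0, 0], [0, 0, 0, 0, 0, 0, 0, 0, 0], [0, 0, 0, 0, 0, 0, 0, 0, 0], [0, 0, 0, 0, 0, 0, 0, 0, 0]] : List (List Int)) = ([[a0, 0, a0, a1, 0, a1, a2, 0, a2], [0, a0, 0, 0, a1, 0, 0, a2, 0], [a0, 0, a0, a1, 0, a1, a2, 0, a2], [b0, 0, b0, b1, 0, b1, b2, 0, b2], [0, b0, 0, 0, b1, 0, 0, b2, 0], [b0, 0, b0, b1, 0, b1, b2, 0, b2], [0, 0, 0, 0, 0, 0, 0, 0, 0], [0, 0, 0, 0, 0, 0, 0, 0, 0], [0, 0, 0, 0, 0, 0, 0, 0, 0]] : List (List Int)) := by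
  by_cases h : b2 = 0
  · subst h; simp [pvS]
  · simp [pvS, h, PySem.List.pySetD, PySem.List.pySet?, PySem.List.pyGetD, PySem.List.pyGet?, PySem.List.pyIdx?, List.set]

theorem pvStep6 (a0 a1 a2 b0 b1 b2 c0 c1 c2 : Int) :
    pvS c0 2 0 ([[a0, 0, a0, a1, 0, a1, a2, 0, a2], [0, a0, 0, 0, a1, 0, 0, a2, 0], [a0, 0, a0, a1, 0, a1, a2, 0, a2], [b0, 0, b0, b1, 0, b1, b2, 0, b2], [0, b0, 0, 0, b1, 0, 0, b2, 0], [b0, 0, b0, b1, 0, b1, b2, 0, b2], [0, 0, 0, 0, 0, 0, 0, 0, 0], [0, 0, 0, 0, 0, 0, 0, 0, 0], [0, 0, 0, 0, 0, 0, 0, 0, 0]] : List (List Int)) = ([[a0, 0, a0, a1, 0, a1, a2, 0, a2], [0, a0, 0, 0, a1, 0, 0, a2, 0], [a0, 0, a0, a1, 0, a1, a2, 0, a2], [b0, 0, b0, b1, 0, b1, b2, 0, b2], [0, b0, 0, 0, b1, 0, 0, b2, 0], [b0, 0, b0, b1, 0, b1, b2, 0, b2], [c0, 0, c0, 0, 0,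 0, 0, 0, 0], [0, c0, 0, 0, 0, 0, 0, 0, 0], [c0, 0, c0, 0, 0, 0, 0, 0, 0]] : List (List Int)) := by
  by_cases h : c0 = 0
  · subst h; simp [pvS]
  · simp [pvS, h, PySem.List.pySetD, PySem.List.pySet?, PySem.List.pyGetD, PySem.List.pyGet?, PySem.List.pyIdx?, List.set]

theorem pvStep7 (a0 a1 a2 b0 b1 b2 c0 c1 c2 : Int) :
    pvS c1 2 1 ([[a0, 0, a0, a1, 0, a1, a2, 0, a2], [0, a0, 0, 0, a1, 0, 0, a2, 0], [a0, 0, a0, a1, 0, a1, a2, 0, a2], [b0, 0, b0, b1, 0, b1, b2, 0, b2], [0, b0, 0, 0, b1, 0, 0, b2, 0], [b0, 0, b0, b1, 0, b1, b2, 0, b2], [c0, 0, c0, 0, 0, 0, 0, 0, 0], [0, c0, 0, 0, 0, 0, 0, 0, 0], [c0, 0, c0, 0, 0, 0, 0, 0, 0]] : List (List Int)) = ([[a0, 0, a0, a1, 0, a1, a2, 0, a2], [0, a0, 0, 0, a1, 0, 0, a2, 0], [a0, 0, a0, a1, 0, a1, a2, 0, a2], [b0, 0, b0, b1, 0, b1,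 b2, 0, b2], [0, b0, 0, 0, b1, 0, 0, b2, 0], [b0, 0, b0, b1, 0, b1, b2, 0, b2], [c0, 0, c0, c1, 0, c1, 0, 0, 0], [0, c0, 0, 0, c1, 0, 0, 0, 0], [c0, 0, c0, c1, 0, c1, 0, 0, 0]] : List (List Int)) := by
  by_cases h : c1 = 0
  · subst h; simp [pvS]
  · simp [pvS, h, PySem.List.pySetD, PySem.List.pySet?, PySem.List.pyGetD, PySem.List.pyGet?, PySem.List.pyIdx?, List.set]

theorem pvStep8 (a0 a1 a2 b0 b1 b2 c0 c1 c2 : Int) :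
    pvS c2 2 2 ([[a0, 0, a0, a1, 0, a1, a2, 0, a2], [0, a0, 0, 0, a1, 0, 0, a2, 0], [a0, 0, a0, a1, 0, a1, a2, 0, a2], [b0, 0, b0, b1, 0, b1, b2, 0, b2], [0, b0, 0, 0, b1, 0, 0, b2, 0], [b0, 0, b0, b1, 0, b1, b2, 0, b2], [c0, 0, c0, c1, 0, c1, 0, 0, 0], [0, c0, 0, 0, c1, 0, 0, 0, 0], [c0, 0, c0, c1, 0, c1, 0, 0, 0]] : List (List Int)) = ([[a0, 0, a0, a1, 0, a1, a2, 0, a2], [0, a0, 0, 0, a1, 0, 0, a2, 0], [a0, 0, a0, a1, 0, a1, a2, 0, a2], [b0, 0, b0, b1, 0, b1, b2, 0, b2], [0, b0, 0, 0, b1, 0, 0, b2, 0], [b0, 0, b0, b1, 0, b1, b2, 0, b2], [c0, 0, c0, c1, 0, c1, c2, 0, c2], [0, c0, 0, 0, c1, 0, 0, c2, 0], [c0, 0, c0, c1, 0, c1, c2, 0, c2]] : List (List Int)) := by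
  by_cases h : c2 = 0
  · subst h; simp [pvS]
  · simp [pvS, h, PySem.List.pySetD, PySem.List.pySet?, PySem.List.pyGetD, PySem.List.pyGet?, PySem.List.pyIdx?, List.set]

theorem pvBval (a0 a1 a2 b0 b1 b2 c0 c1 c2 : Int) (ta tb tc : List Int) (tg : List (List Int)) :
    transform_gpt_4o_alt ((a0::a1::a2::ta)::(b0::b1::b2::tb)::(c0::c1::c2::tc)::tg) = ([[a0, 0, a0, a1, 0, a1, a2, 0, a2], [0, a0, 0, 0, a1, 0, 0, a2, 0], [a0, 0, a0, a1, 0, a1, a2, 0, a2], [b0, 0, b0, b1, 0, b1, b2, 0, b2], [0, b0, 0, 0, b1, 0, 0, b2, 0], [b0, 0, b0, b1, 0, b1, b2, 0, b2], [c0, 0, c0, c1, 0, c1, c2, 0, c2], [0, c0, 0, 0, c1, 0, 0, c2, 0], [c0, 0, c0, c1, 0, c1, c2, 0, c2]] : List (List Int)) := by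
  have r9 : PySem.List.pyRange 0 9 1 = ([0, 1, 2, 3, 4, 5, 6, 7, 8] : List Int) := by decide
  have m0 : PySem.Int.mod 0 3 = 0 := by decide
  have m1 : PySem.Int.mod 1 3 = 1 := by decide
  have m2 : PySem.Int.mod 2 3 = 2 := by decide
  have m3 : PySem.Int.mod 3 3 = 0 := by decide
  have m4 : PySem.Int.mod 4 3 = 1 := by decide
  have m5 : PySem.Int.mod 5 3 = 2 := by decide
  have m6 : PySem.Int.mod 6 3 = 0 := by decide
  have m7 : PySem.Int.mod 7 3 = 1 := by decide
  have m8 : PySem.Int.mod 8 3 = 2 := by decide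
  have f0 : PySem.Int.floordiv 0 3 = 0 := by decide
  have f1 : PySem.Int.floordiv 1 3 = 0 := by decide
  have f2 : PySem.Int.floordiv 2 3 = 0 := by decide
  have f3 : PySem.Int.floordiv 3 3 = 1 := by decide
  have f4 : PySem.Int.floordiv 4 3 = 1 := by decide
  have f5 : PySem.Int.floordiv 5 3 = 1 := by decide
  have f6 : PySem.Int.floordiv 6 3 = 2 := by decide
  have f7 : PySem.Int.floordiv 7 3 = 2 := by decide
  have f8 : PySem.Int.floordiv 8 3 = 2 := by decide
  have q00 : PySem.Set.contains (PySem.Set.ofList [((0:Int), (0:Int)), (1, 1), (2, 2), (2, 0), (0, 2)]) ((0:Int), (0:Int)) = true := by decide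
  have q01 : PySem.Set.contains (PySem.Set.ofList [((0:Int), (0:Int)), (1, 1), (2, 2), (2, 0), (0, 2)]) ((0:Int), (1:Int)) = false := by decide
  have q02 : PySem.Set.contains (PySem.Set.ofList [((0:Int), (0:Int)), (1, 1), (2, 2), (2, 0), (0, 2)]) ((0:Int), (2:Int)) = true := by decide
  have q10 : PySem.Set.contains (PySem.Set.ofList [((0:Int), (0:Int)), (1, 1), (2, 2), (2, 0), (0, 2)]) ((1:Int), (0:Int)) = false := by decide
  have q11 : PySem.Set.contains (PySem.Set.ofList [((0:Int), (0:Int)), (1, 1), (2, 2), (2, 0), (0, 2)]) ((1:Int), (1:Int)) = true := by decide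
  have q12 : PySem.Set.contains (PySem.Set.ofList [((0:Int), (0:Int)), (1, 1), (2, 2), (2, 0), (0, 2)]) ((1:Int), (2:Int)) = false := by decide
  have q20 : PySem.Set.contains (PySem.Set.ofList [((0:Int), (0:Int)), (1, 1), (2, 2), (2, 0), (0, 2)]) ((2:Int), (0:Int)) = true := by decide
  have q21 : PySem.Set.contains (PySem.Set.ofList [((0:Int), (0:Int)), (1, 1), (2, 2), (2, 0), (0, 2)]) ((2:Int), (1:Int)) = false := by decide
  have q22 : PySem.Set.contains (PySem.Set.ofList [((0:Int), (0:Int)), (1, 1), (2, 2), (2, 0), (0, 2)]) ((2:Int), (2:Int)) = true := by decide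
  have g00 : PySem.List.pyGetD (PySem.List.pyGetD ((a0::a1::a2::ta)::(b0::b1::b2::tb)::(c0::c1::c2::tc)::tg : List (List Int)) 0 []) 0 0 = a0 := by rw [PySem.List.pyGetD_ofNat', PySem.List.pyGetD_ofNat']; rfl
  have g01 : PySem.List.pyGetD (PySem.List.pyGetD ((a0::a1::a2::ta)::(b0::b1::b2::tb)::(c0::c1::c2::tc)::tg : List (List Int)) 0 []) 1 0 = a1 := by rw [PySem.List.pyGetD_ofNat', PySem.List.pyGetD_ofNat']; rfl
  have g02 : PySem.List.pyGetD (PySem.List.pyGetD ((a0::a1::a2::ta)::(b0::b1::b2::tb)::(c0::c1::c2::tc)::tg : List (List Int)) 0 []) 2 0 = a2 := by rw [PySem.List.pyGetD_ofNat', PySem.List.pyGetD_ofNat']; rfl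
  have g10 : PySem.List.pyGetD (PySem.List.pyGetD ((a0::a1::a2::ta)::(b0::b1::b2::tb)::(c0::c1::c2::tc)::tg : List (List Int)) 1 []) 0 0 = b0 := by rw [PySem.List.pyGetD_ofNat', PySem.List.pyGetD_ofNat']; rfl
  have g11 : PySem.List.pyGetD (PySem.List.pyGetD ((a0::a1::a2::ta)::(b0::b1::b2::tb)::(c0::c1::c2::tc)::tg : List (List Int)) 1 []) 1 0 = b1 := by rw [PySem.List.pyGetD_ofNat', PySem.List.pyGetD_ofNat']; rfl
  have g12 : PySem.List.pyGetD (PySem.List.pyGetD ((a0::a1::a2::ta)::(b0::b1::b2::tb)::(c0::c1::c2::tc)::tg : List (List Int)) 1 []) 2 0 = b2 := by rw [PySem.List.pyGetD_ofNat', PySem.List.pyGetD_ofNat']; rfl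
  have g20 : PySem.List.pyGetD (PySem.List.pyGetD ((a0::a1::a2::ta)::(b0::b1::b2::tb)::(c0::c1::c2::tc)::tg : List (List Int)) 2 []) 0 0 = c0 := by rw [PySem.List.pyGetD_ofNat', PySem.List.pyGetD_ofNat']; rfl
  have g21 : PySem.List.pyGetD (PySem.List.pyGetD ((a0::a1::a2::ta)::(b0::b1::b2::tb)::(c0::c1::c2::tc)::tg : List (List Int)) 2 []) 1 0 = c1 := by rw [PySem.List.pyGetD_ofNat', PySem.List.pyGetD_ofNat']; rfl
  have g22 : PySem.List.pyGetD (PySem.List.pyGetD ((a0::a1::a2::ta)::(b0::b1::b2::tb)::(c0::c1::c2::tc)::tg : List (List Int)) 2 []) 2 0 = c2 := by rw [PySem.List.pyGetD_ofNat', PySem.List.pyGetD_ofNat']; rfl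
  simp only [transform_gpt_4o_alt, r9, List.map]
  simp only [m0,m1,m2,m3,m4,m5,m6,m7,m8,f0,f1,f2,f3,f4,f5,f6,f7,f8,
    q00,q01,q02,q10,q11,q12,q20,q21,q22, if_true, if_false,
    g00,g01,g02,g10,g11,g12,g20,g21,g22]
  simp

theorem pvAval (a0 a1 a2 b0 b1 b2 c0 c1 c2 : Int) (ta tb tc : List Int) (tg : List (List Int)) :
    transform_gpt_4o ((a0::a1::a2::ta)::(b0::b1::b2::tb)::(c0::c1::c2::tc)::tg) = ([[a0, 0, a0, a1, 0, a1, a2, 0, a2], [0, a0, 0, 0, a1, 0, 0, a2, 0], [a0, 0, a0, a1, 0, a1, a2, 0, a2], [b0, 0, b0, b1, 0, b1, b2, 0, b2], [0, b0, 0, 0, b1, 0, 0, b2, 0], [b0, 0, b0, b1, 0, b1, b2, 0, b2], [c0, 0, c0, c1, 0, c1, c2, 0, c2], [0, c0, 0, 0, c1, 0, 0, c2, 0], [c0, 0, c0, c1, 0, c1, c2, 0, c2]] : List (List Int)) := by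
  have r3 : PySem.List.pyRange 0 3 1 = ([0, 1, 2] : List Int) := by decide
  have r9 : PySem.List.pyRange 0 9 1 = ([0, 1, 2, 3, 4, 5, 6, 7, 8] : List Int) := by decide
  have g00 : PySem.List.pyGetD (PySem.List.pyGetD ((a0::a1::a2::ta)::(b0::b1::b2::tb)::(c0::c1::c2::tc)::tg : List (List Int)) 0 []) 0 0 = a0 := by rw [PySem.List.pyGetD_ofNat', PySem.List.pyGetD_ofNat']; rfl
  have g01 : PySem.List.pyGetD (PySem.List.pyGetD ((a0::a1::a2::ta)::(b0::b1::b2::tb)::(c0::c1::c2::tc)::tg : List (List Int)) 0 []) 1 0 = a1 := by rw [PySem.List.pyGetD_ofNat', PySem.List.pyGetD_ofNat']; rfl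
  have g02 : PySem.List.pyGetD (PySem.List.pyGetD ((a0::a1::a2::ta)::(b0::b1::b2::tb)::(c0::c1::c2::tc)::tg : List (List Int)) 0 []) 2 0 = a2 := by rw [PySem.List.pyGetD_ofNat', PySem.List.pyGetD_ofNat']; rfl
  have g10 : PySem.List.pyGetD (PySem.List.pyGetD ((a0::a1::a2::ta)::(b0::b1::b2::tb)::(c0::c1::c2::tc)::tg : List (List Int)) 1 []) 0 0 = b0 := by rw [PySem.List.pyGetD_ofNat', PySem.List.pyGetD_ofNat']; rfl
  have g11 : PySem.List.pyGetD (PySem.List.pyGetD ((a0::a1::a2::ta)::(b0::b1::b2::tb)::(c0::c1::c2::tc)::tg : List (List Int)) 1 []) 1 0 = b1 := by rw [PySem.List.pyGetD_ofNat', PySem.List.pyGetD_ofNat']; rfl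
  have g12 : PySem.List.pyGetD (PySem.List.pyGetD ((a0::a1::a2::ta)::(b0::b1::b2::tb)::(c0::c1::c2::tc)::tg : List (List Int)) 1 []) 2 0 = b2 := by rw [PySem.List.pyGetD_ofNat', PySem.List.pyGetD_ofNat']; rfl
  have g20 : PySem.List.pyGetD (PySem.List.pyGetD ((a0::a1::a2::ta)::(b0::b1::b2::tb)::(c0::c1::c2::tc)::tg : List (List Int)) 2 []) 0 0 = c0 := by rw [PySem.List.pyGetD_ofNat', PySem.List.pyGetD_ofNat']; rfl
  have g21 : PySem.List.pyGetD (PySem.List.pyGetD ((a0::a1::a2::ta)::(b0::b1::b2::tb)::(c0::c1::c2::tc)::tg : List (List Int)) 2 []) 1 0 = c1 := by rw [PySem.List.pyGetD_ofNat', PySem.List.pyGetD_ofNat']; rfl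
  have g22 : PySem.List.pyGetD (PySem.List.pyGetD ((a0::a1::a2::ta)::(b0::b1::b2::tb)::(c0::c1::c2::tc)::tg : List (List Int)) 2 []) 2 0 = c2 := by rw [PySem.List.pyGetD_ofNat', PySem.List.pyGetD_ofNat']; rfl
  have hA' : transform_gpt_4o ((a0::a1::a2::ta)::(b0::b1::b2::tb)::(c0::c1::c2::tc)::tg) = (pvS c2 2 2 (pvS c1 2 1 (pvS c0 2 0 (pvS b2 1 2 (pvS b1 1 1 (pvS b0 1 0 (pvS a2 0 2 (pvS a1 0 1 (pvS a0 0 0 ([[0, 0, 0, 0, 0, 0, 0, 0, 0], [0, 0, 0, 0, 0, 0, 0, 0, 0], [0, 0, 0, 0, 0, 0, 0, 0, 0], [0, 0, 0, 0, 0, 0, 0, 0, 0], [0, 0, 0, 0, 0, 0, 0, 0, 0], [0, 0, 0, 0, 0, 0, 0, 0, 0], [0, 0, 0, 0, 0, 0, 0, 0, 0], [0, 0, 0, 0, 0, 0, 0, 0, 0], [0, 0, 0, 0, 0, 0, 0, 0, 0]] : List (List Int))))))))))) := by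
    simp only [transform_gpt_4o]
    simp only [pvS_eq]
    rw [r3, r9]
    simp only [List.foldl, List.map, List.replicate]
    simp only [g00,g01,g02,g10,g11,g12,g20,g21,g22]
  rw [hA', pvStep0 a0 a1 a2 b0 b1 b2 c0 c1 c2, pvStep1 a0 a1 a2 b0 b1 b2 c0 c1 c2, pvStep2 a0 a1 a2 b0 b1 b2 c0 c1 c2, pvStep3 a0 a1 a2 b0 b1 b2 c0 c1 c2, pvStep4 a0 a1 a2 b0 b1 b2 c0 c1 c2, pvStep5 a0 a1 a2 b0 b1 b2 c0 c1 c2, pvStep6 a0 a1 a2 b0 b1 b2 c0 c1 c2, pvStep7 a0 a1 a2 b0 b1 b2 c0 c1 c2, pvStep8 a0 a1 a2 b0 b1 b2 c0 c1 c2]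

theorem pvKey (grid : List (List Int)) (hpre : Pre_transform_gpt_4o grid) :
    transform_gpt_4o grid = transform_gpt_4o_alt grid := by
  obtain ⟨hlen, hrows⟩ := hpre
  rcases grid with _ | ⟨r0, grid⟩; · simp at hlen
  rcases grid with _ | ⟨r1, grid⟩; · simp at hlen
  rcases grid with _ | ⟨r2, tg⟩; · simp at hlen
  have h0 : 3 ≤ r0.length := hrows r0 (by simp)
  have h1 : 3 ≤ r1.length := hrows r1 (by simp)
  have h2 : 3 ≤ r2.length := hrows r2 (by simp)
  rcases r0 with _ | ⟨a0, r0⟩; · simp at h0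
  rcases r0 with _ | ⟨a1, r0⟩; · simp at h0
  rcases r0 with _ | ⟨a2, ta⟩; · simp at h0
  rcases r1 with _ | ⟨b0, r1⟩; · simp at h1
  rcases r1 with _ | ⟨b1, r1⟩; · simp at h1
  rcases r1 with _ | ⟨b2, tb⟩; · simp at h1
  rcases r2 with _ | ⟨c0, r2⟩; · simp at h2
  rcases r2 with _ | ⟨c1, r2⟩; · simp at h2
  rcases r2 with _ | ⟨c2, tc⟩; · simp at h2
  rw [pvAval, pvBval]

-- ===== VERDICT (by name: the statement is the Claim_ definition above) =====
theorem transform_gpt_4o_spec : Claim_equal_transform_gpt_4o := by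
  intro grid _ hpre
  exact pvKey grid hpre
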